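-- pv_equiv track=rewrite | github.com/chlos/exercises_in_futility | leetcode/wildcard_matching.py | prune_pattern
-- ===== SOURCE A (Python) =====
-- def prune_pattern(p):
--     new_pattern = []
--     for ch in p:
--         if not new_pattern or ch != '*':
--             new_pattern.append(ch)
--         elif new_pattern[-1] != '*':
--             new_pattern.append(ch)
--     return ''.join(new_pattern)
-- ===== SOURCE B (Python) =====
-- def prune_pattern(p):
--     out = []
--     n = len(p)
--     i = 0
--     while i < n:
--         j = i
--         while j < n and p[j] == p[i]:
--             j += 1
--         if p[i] == '*':
--             out.append('*')
--         else:
--             out.extend(p[i:j])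
--         i = j
--     return ''.join(out)
-- ===== Notes on version B (the rewrite author's own statement) =====
-- stated objective: alternative
-- what changed: B scans the pattern by maximal runs of equal characters with a two-index run scanner (emit one '*' per star run, emit other runs whole), instead of A's char-by-char scan that inspects the last appended character.
import Mathlib
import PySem

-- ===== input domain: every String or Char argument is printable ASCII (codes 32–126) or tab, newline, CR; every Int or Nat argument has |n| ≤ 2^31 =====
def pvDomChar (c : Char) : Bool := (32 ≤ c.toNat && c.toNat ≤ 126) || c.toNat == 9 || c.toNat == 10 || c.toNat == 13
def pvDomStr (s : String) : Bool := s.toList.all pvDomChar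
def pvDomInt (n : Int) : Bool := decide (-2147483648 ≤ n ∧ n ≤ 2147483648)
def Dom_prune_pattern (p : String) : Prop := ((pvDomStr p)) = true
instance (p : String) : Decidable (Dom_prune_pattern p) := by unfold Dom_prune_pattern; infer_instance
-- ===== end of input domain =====

-- B replaces A's char-by-char scan (which inspects the last appended char) by a run-by-run
-- scan with a two-index run scanner: an alternative decomposition of the same O(n) task.

-- ===== PORT A =====
-- one loop-body step of A: append ch unless the last appended char and ch are both '*'
def pvStepA (acc : List Char) (ch : Char) : List Char :=
  if acc = [] ∨ ch ≠ '*' then acc ++ [ch]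
  else if PySem.List.pyGetD acc (-1) ' ' ≠ '*' then acc ++ [ch]
  else acc

def prune_pattern (p : String) : String :=
  String.ofList (p.toList.foldl pvStepA [])

-- ===== PORT B =====
-- inner 'while j < n and p[j] == p[i]' loop of B
def pvRunEnd (l : List Char) (n : Nat) (c : Char) (j : Nat) : Nat :=
  if j < n ∧ l.getD j ' ' = c then pvRunEnd l n c (j + 1) else j
termination_by n - j

-- outer 'while i < n' loop of B
def pvAltLoop (l : List Char) (n : Nat) (i : Nat) (out : List Char) : List Char :=
  if h : i < n then
    let j := pvRunEnd l n (l.getD i ' ') i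
    let out' := if l.getD i ' ' = '*' then out ++ ['*']
                else out ++ PySem.List.slice l (some (i : Int)) (some (j : Int))
    pvAltLoop l n j out'
  else out
termination_by n - i
decreasing_by
  have hge : i + 1 ≤ pvRunEnd l n (l.getD i ' ') i := by
    rw [pvRunEnd]
    simp only [h, and_true, if_pos]
    have : ∀ k, k ≤ pvRunEnd l n (l.getD i ' ') k := by
      intro k
      induction k using pvRunEnd.induct (l := l) (n := n) (c := l.getD i ' ') with
      | case1 k hk ih => rw [pvRunEnd, if_pos hk]; omega
      | case2 k hk => rw [pvRunEnd, if_neg hk]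
    exact le_trans (by omega) (this (i + 1))
  omega

def prune_pattern_alt (p : String) : String :=
  String.ofList (pvAltLoop p.toList p.toList.length 0 [])

-- ===== PRECONDITION & SPEC =====
def Spec_prune_pattern (p : String) (out : String) : Prop := out = prune_pattern_alt p
instance (p : String) (out : String) : Decidable (Spec_prune_pattern p out) := by unfold Spec_prune_pattern; infer_instance

-- ===== CLAIM (what is proved, stated in full; the proofs are below) =====
def Claim_equal_prune_pattern : Prop := ∀ (p : String), Dom_prune_pattern p → Spec_prune_pattern p (prune_pattern p)

-- ===== LEMMAS AND PROOFS =====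

-- reference function: pvG b l = the pruned tail, b = "last emitted char was '*'"
def pvG (b : Bool) : List Char → List Char
  | [] => []
  | c :: cs => if b && (c == '*') then pvG b cs else c :: pvG (c == '*') cs

theorem pvFoldA_eq (l : List Char) : ∀ acc : List Char,
    l.foldl pvStepA acc = acc ++ pvG (acc.getLast? == some '*') l := by
  induction l with
  | nil => intro acc; simp [pvG]
  | cons c cs ih =>
    intro acc
    rw [List.foldl_cons, ih]
    by_cases hacc : acc = []
    · subst hacc
      simp [pvStepA, pvG]
    · by_cases hc : c = '*'
      · subst hc
        by_cases hl : acc.getLast? = some '*'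
        · have hlasteq : PySem.List.pyGetD acc (-1) ' ' = '*' := by
            rw [PySem.List.pyGetD_neg_one acc ' ' hacc]
            have h2 := List.getLast?_eq_some_getLast (l := acc) hacc
            rw [h2] at hl
            exact Option.some_inj.mp hl
          have : pvStepA acc '*' = acc := by
            simp [pvStepA, hacc, hlasteq]
          rw [this, hl]
          simp [pvG]
        · have hlast : PySem.List.pyGetD acc (-1) ' ' ≠ '*' := by
            rw [PySem.List.pyGetD_neg_one acc ' ' hacc]
            intro h; exact hl (by rw [List.getLast?_eq_some_getLast hacc, h])
          have : pvStepA acc '*' = acc ++ ['*'] := by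
            simp [pvStepA, hacc, hlast]
          rw [this]
          have hb : (acc.getLast? == some '*') = false := by
            simp [hl]
          rw [hb]
          simp [pvG, List.getLast?_append]
      · have : pvStepA acc c = acc ++ [c] := by simp [pvStepA, hc]
        rw [this]
        have hb2 : ((acc ++ [c]).getLast? == some '*') = (c == '*') := by
          simp [List.getLast?_append]
        rw [hb2]
        simp [pvG, hc]

theorem pvRunEnd_eq (l : List Char) (c : Char) : ∀ j : Nat, j ≤ l.length →
    pvRunEnd l l.length c j = j + ((l.drop j).takeWhile (· = c)).length := by
  intro j
  induction j using pvRunEnd.induct (l := l) (n := l.length) (c := c) with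
  | case1 j hj ih =>
    intro _
    obtain ⟨hjn, hgd⟩ := hj
    rw [pvRunEnd, if_pos ⟨hjn, hgd⟩, ih (by omega)]
    have hd : l.drop j = l[j] :: l.drop (j + 1) := (List.getElem_cons_drop hjn).symm
    have hLj : l[j] = c := by rw [← List.getD_eq_getElem l ' ' hjn]; exact hgd
    rw [hd, List.takeWhile_cons, if_pos (by simp [hLj])]
    simp; omega
  | case2 j hj =>
    intro hjle
    rw [pvRunEnd, if_neg hj]
    rcases Nat.lt_or_ge j l.length with h | h
    · have hgd : l.getD j ' ' ≠ c := by tauto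
      have hd : l.drop j = l[j] :: l.drop (j + 1) := (List.getElem_cons_drop h).symm
      have hLj : l[j] ≠ c := by rw [← List.getD_eq_getElem l ' ' h]; exact hgd
      rw [hd, List.takeWhile_cons, if_neg (by simp [hLj])]
      simp
    · have : l.drop j = [] := List.drop_eq_nil_of_le h
      simp [this]

theorem pvG_false_append (t rest : List Char) (h : ∀ x ∈ t, x ≠ '*') :
    pvG false (t ++ rest) = t ++ pvG false rest := by
  induction t with
  | nil => rfl
  | cons x xs ih =>
    have hx : x ≠ '*' := h x (by simp)
    simp only [List.cons_append, pvG, Bool.false_and]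
    rw [show (x == '*') = false by simp [hx]]
    simp [ih (fun y hy => h y (by simp [hy]))]

theorem pvG_true_stars (t rest : List Char) (h : ∀ x ∈ t, x = '*') :
    pvG true (t ++ rest) = pvG true rest := by
  induction t with
  | nil => rfl
  | cons x xs ih =>
    have hx : x = '*' := h x (by simp)
    simp only [List.cons_append, pvG, hx]
    rw [if_pos (by simp)]
    exact ih (fun y hy => h y (by simp [hy]))

theorem pvG_true_eq_false (rest : List Char) (h : rest.head? ≠ some '*') :
    pvG true rest = pvG false rest := by
  cases rest with
  | nil => rfl
  | cons c cs =>
    have hc : c ≠ '*' := by intro hh; exact h (by simp [hh])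
    simp [pvG, hc]

theorem pvG_false_cons (c : Char) (cs : List Char) :
    pvG false (c :: cs) = c :: pvG (c == '*') cs := by simp [pvG]

theorem pvHead_dropWhile (p : Char → Bool) (l : List Char) :
    ∀ x, (l.dropWhile p).head? = some x → p x = false := by
  induction l with
  | nil => intro x hx; simp [List.dropWhile] at hx
  | cons c cs ih =>
    intro x hx
    rw [List.dropWhile_cons] at hx
    by_cases hp : p c
    · rw [if_pos hp] at hx; exact ih x hx
    · rw [if_neg hp] at hx
      simp at hx
      rw [← hx]; simp [hp]

theorem pvAltLoop_eq (l : List Char) : ∀ k i out, l.length - i = k → i ≤ l.length →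
    pvAltLoop l l.length i out = out ++ pvG false (l.drop i) := by
  intro k
  induction k using Nat.strong_induction_on with
  | _ k ih =>
    intro i out hk hi
    by_cases h : i < l.length
    · rw [pvAltLoop, dif_pos h]
      show pvAltLoop l l.length (pvRunEnd l l.length (l.getD i ' ') i)
          (if l.getD i ' ' = '*' then out ++ ['*']
           else out ++ PySem.List.slice l (some (i : Int))
             (some ((pvRunEnd l l.length (l.getD i ' ') i : Nat) : Int))) =
        out ++ pvG false (l.drop i)
      set c := l.getD i ' ' with hc
      set t := (l.drop i).takeWhile (· = c) with ht
      have hj : pvRunEnd l l.length c i = i + t.length := pvRunEnd_eq l c i (by omega)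
      have hdi : l.drop i = l[i] :: l.drop (i + 1) := (List.getElem_cons_drop h).symm
      have hci : c = l[i] := List.getD_eq_getElem l ' ' h
      have htc : t = l[i] :: (l.drop (i + 1)).takeWhile (· = c) := by
        rw [ht, hdi, List.takeWhile_cons, if_pos (by simp [hci])]
      have htpos : 1 ≤ t.length := by rw [htc]; simp
      have htle : t.length ≤ l.length - i := by
        have := (List.takeWhile_sublist (p := (· = c)) (l := l.drop i)).length_le
        simpa [← ht] using this
      have hsplit : l.drop i = t ++ (l.drop i).dropWhile (· = c) := by
        rw [ht]; exact (List.takeWhile_append_dropWhile).symm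
      have hdropj : l.drop (i + t.length) = (l.drop i).dropWhile (· = c) := by
        have h1 : l.drop (i + t.length) = (l.drop i).drop t.length := List.drop_drop.symm
        rw [h1]
        conv_lhs => rw [hsplit]
        exact List.drop_left' rfl
      have htmem : ∀ x ∈ t, x = c := by
        intro x hx
        have := List.mem_takeWhile_imp (ht ▸ hx)
        simpa using this
      have hrec : ∀ out2 : List Char, pvAltLoop l l.length (i + t.length) out2 =
          out2 ++ pvG false (l.drop (i + t.length)) :=
        fun out2 => ih (l.length - (i + t.length)) (by omega) (i + t.length) out2 rfl (by omega)
      by_cases hstar : c = '*'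
      · rw [hj, if_pos hstar, hrec _, hdropj]
        have hLi : l[i] = '*' := by rw [← hci]; exact hstar
        have hhead : ((l.drop i).dropWhile (· = c)).head? ≠ some '*' := by
          intro hh
          have := pvHead_dropWhile (· = c) (l.drop i) '*' hh
          simp [hstar] at this
        have hstars : ∀ x ∈ (l.drop (i + 1)).takeWhile (fun x => decide (x = c)), x = '*' :=
          fun x hx => by
            rw [htmem x (by rw [htc]; exact List.mem_cons_of_mem _ hx)]; exact hstar
        symm
        calc out ++ pvG false (l.drop i)
            = out ++ pvG false (t ++ (l.drop i).dropWhile (· = c)) := by rw [← hsplit]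
          _ = out ++ ['*'] ++ pvG false ((l.drop i).dropWhile (· = c)) := by
              rw [htc, List.cons_append, pvG_false_cons]
              rw [show (l[i] == '*') = true by simp [hLi]]
              rw [pvG_true_stars _ _ hstars, pvG_true_eq_false _ hhead, hLi]
              simp
      · rw [hj, if_neg hstar, hrec _, hdropj]
        have hslice : PySem.List.slice l (some (i : Int)) (some ((i + t.length : Nat) : Int)) = t := by
          rw [PySem.List.slice_natCast]
          have he : i + t.length - i = t.length := by omega
          rw [he]
          conv_lhs => rw [hsplit]
          exact List.take_left' rfl
        rw [show ((i + t.length : Nat) : Int) = (i : Int) + (t.length : Int) from by push_cast; ring] at hslice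
        push_cast
        rw [hslice]
        symm
        calc out ++ pvG false (l.drop i)
            = out ++ pvG false (t ++ (l.drop i).dropWhile (· = c)) := by rw [← hsplit]
          _ = out ++ (t ++ pvG false ((l.drop i).dropWhile (· = c))) := by
              rw [pvG_false_append _ _ (fun x hx => by rw [htmem x hx]; exact hstar)]
          _ = out ++ t ++ pvG false ((l.drop i).dropWhile (· = c)) := by simp
    · rw [pvAltLoop, dif_neg h]
      have : l.drop i = [] := List.drop_eq_nil_of_le (by omega)
      simp [this, pvG]

-- ===== VERDICT (by name: the statement is the Claim_ definition above) =====
theorem prune_pattern_spec : Claim_equal_prune_pattern := by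
  intro p _
  unfold Spec_prune_pattern prune_pattern prune_pattern_alt
  rw [pvFoldA_eq, pvAltLoop_eq p.toList (p.toList.length - 0) 0 [] rfl (by omega)]
  simp
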